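-- pv_equiv track=rewrite | github.com/olsenw/LeetCodeExercises | Python3/total_waviness_of_numbers_in_range_I.py | totalWaviness
-- ===== SOURCE A (Python) =====
-- from functools import cache
--
-- def totalWaviness(num1: int, num2: int) -> int:
--     @cache
--     # def waviness(n:list[int]) -> int:
--     def waviness(n:int) -> int:
--         n = list(int(s) for s in str(n))
--         answer = 0
--         for i in range(1,len(n)-1):
--             if n[i-1] < n[i] > n[i+1]:
--                 answer += 1
--             if n[i-1] > n[i] < n[i+1]:
--                 answer += 1
--         return answer
--     answer = 0
--     for n in range(num1, num2+1):
--         # n = list(int(s) for s in str(n))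
--         answer += waviness(n)
--     return answer
-- ===== SOURCE B (Python) =====
-- def totalWaviness(num1: int, num2: int) -> int:
--     # Count by prefix sums: T(N) = sum of waviness over [0, N], computed by a
--     # digit-block recursion (O(D^2)) instead of scanning every number in range.
--     def tri(a, b, c):
--         return 1 if (a < b > c or a > b < c) else 0
--
--     def wav(n):  # waviness of one number, by digit peeling
--         w = 0
--         while n >= 100:
--             w += tri(n // 100 % 10, n // 10 % 10, n % 10)
--             n //= 10
--         return w
--
--     def t(x):  # sum over d in 0..9 of tri(x // 10, x % 10, d), closed form
--         a, b = divmod(x, 10)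
--         return b if a < b else (9 - b if a > b else 0)
--
--     def pre(i):  # prefix sum of t over 0..i-1
--         return sum(t(m) for m in range(i))
--
--     def C(M):  # sum_{m=0}^{M} (t(m % 100) if m >= 10 else 0); period-100 closed form
--         if M < 10:
--             return 0
--         K = M + 1
--         return K // 100 * 570 + pre(K % 100) - 45
--
--     def P(q, r):  # sum_{d=0}^{r} tri(q // 10 % 10, q % 10, d), closed form
--         a, b = q // 10 % 10, q % 10
--         if a < b:
--             return min(r + 1, b)
--         if a > b:
--             return r - b if r > b else 0
--         return 0
--
--     def T(N):  # sum of waviness over [0, N]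
--         if N < 100:
--             return 0
--         q, r = divmod(N, 10)
--         return 10 * T(q - 1) + C(q - 1) + (r + 1) * wav(q) + P(q, r)
--
--     if num2 < num1:
--         return 0
--     return T(num2) - T(num1 - 1)
-- ===== Notes on version B (the rewrite author's own statement) =====
-- stated objective: faster
-- what changed: B does not iterate over the range at all: it computes a prefix count T(N) = sum of waviness over [0,N] by a digit-block recursion (full blocks of ten contribute 10*T on the truncated prefix plus a period-100 closed-form correction C, the partial block a closed-form triple count P), and returns T(num2) - T(num1-1).
import Mathlib
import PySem

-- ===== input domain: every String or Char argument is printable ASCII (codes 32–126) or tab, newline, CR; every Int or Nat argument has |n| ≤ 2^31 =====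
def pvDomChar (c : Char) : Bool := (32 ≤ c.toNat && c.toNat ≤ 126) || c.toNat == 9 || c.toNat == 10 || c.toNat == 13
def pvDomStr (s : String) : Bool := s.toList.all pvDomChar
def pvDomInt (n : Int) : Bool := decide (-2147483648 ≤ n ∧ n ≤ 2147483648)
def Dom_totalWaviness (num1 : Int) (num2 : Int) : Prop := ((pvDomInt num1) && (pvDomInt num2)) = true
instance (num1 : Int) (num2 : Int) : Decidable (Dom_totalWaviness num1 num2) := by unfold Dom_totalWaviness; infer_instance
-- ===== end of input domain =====

-- B replaces A's per-number scan of the whole range by a prefix count T(N) = sum of waviness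
-- over [0,N], computed by a digit-block recursion with closed-form block corrections; the
-- answer is T(num2) - T(num1-1). Measured asymptotically faster.

-- ===== PORT A =====
-- int(s) for a single character s of str(n); `.getD 0` is exact here: under Pre_ every n in the
-- range is nonnegative, so every character of str(n) is a digit and ofChars? is `some`.
def pvDigitVal (c : Char) : Int := (PySem.Int.ofChars? [c]).getD 0

-- the body of A's cached helper `waviness` (the cache is pure memoisation, no observable effect)
def pvWavinessA (n : Int) : Int :=
  let digits : List Int := (PySem.Int.toChars n).map pvDigitVal
  (PySem.List.pyRange 1 ((digits.length : Int) - 1)).foldl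
    (fun answer i =>
      let answer :=
        if PySem.List.pyGetD digits (i-1) 0 < PySem.List.pyGetD digits i 0 ∧
           PySem.List.pyGetD digits i 0 > PySem.List.pyGetD digits (i+1) 0
        then answer + 1 else answer
      if PySem.List.pyGetD digits (i-1) 0 > PySem.List.pyGetD digits i 0 ∧
         PySem.List.pyGetD digits i 0 < PySem.List.pyGetD digits (i+1) 0
      then answer + 1 else answer) 0

def totalWaviness (num1 : Int) (num2 : Int) : Int :=
  (PySem.List.pyRange num1 (num2 + 1)).foldl (fun answer n => answer + pvWavinessA n) 0

-- ===== PORT B =====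
-- Source B's tri(a, b, c)
def pvTri (a b c : Int) : Int := if (a < b ∧ b > c) ∨ (a > b ∧ b < c) then 1 else 0

-- Source B's wav(n): the `while n >= 100` digit-peeling loop with accumulator w
def pvWav (n : Int) (w : Int) : Int :=
  if _h : 100 ≤ n then
    pvWav (PySem.Int.floordiv n 10)
      (w + pvTri (PySem.Int.mod (PySem.Int.floordiv n 100) 10)
                 (PySem.Int.mod (PySem.Int.floordiv n 10) 10)
                 (PySem.Int.mod n 10))
  else w
termination_by n.toNat
decreasing_by
  rw [PySem.Int.floordiv_eq_ediv_of_pos (by norm_num)]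
  omega

-- Source B's t(x)
def pvT10 (x : Int) : Int :=
  let a := PySem.Int.floordiv x 10
  let b := PySem.Int.mod x 10
  if a < b then b else if a > b then 9 - b else 0

-- Source B's pre(i) = sum(t(m) for m in range(i))
def pvPre (i : Int) : Int :=
  (PySem.List.pyRange 0 i).foldl (fun s m => s + pvT10 m) 0

-- Source B's C(M)
def pvC (M : Int) : Int :=
  if M < 10 then 0
  else PySem.Int.floordiv (M + 1) 100 * 570 + pvPre (PySem.Int.mod (M + 1) 100) - 45

-- Source B's P(q, r)
def pvP (q r : Int) : Int :=
  let a := PySem.Int.mod (PySem.Int.floordiv q 10) 10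
  let b := PySem.Int.mod q 10
  if a < b then min (r + 1) b
  else if a > b then (if r > b then r - b else 0) else 0

-- Source B's T(N)
def pvT (N : Int) : Int :=
  if h : N < 100 then 0
  else
    let q := PySem.Int.floordiv N 10
    let r := PySem.Int.mod N 10
    10 * pvT (q - 1) + pvC (q - 1) + (r + 1) * pvWav q 0 + pvP q r
termination_by N.toNat
decreasing_by
  rw [PySem.Int.floordiv_eq_ediv_of_pos (by norm_num)]
  omega

def totalWaviness_alt (num1 : Int) (num2 : Int) : Int :=
  if num2 < num1 then 0 else pvT num2 - pvT (num1 - 1)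

-- ===== PRECONDITION & SPEC =====
-- Pre_ excludes exactly the inputs where A raises: if the range is nonempty and reaches a
-- negative n, `int('-')` inside the generator raises ValueError.
def Pre_totalWaviness (num1 : Int) (num2 : Int) : Prop := num2 < num1 ∨ 0 ≤ num1
instance (num1 : Int) (num2 : Int) : Decidable (Pre_totalWaviness num1 num2) := by
  unfold Pre_totalWaviness; infer_instance

def pvWitness_totalWaviness : Int × Int := (100, 132)

def Spec_totalWaviness (num1 : Int) (num2 : Int) (out : Int) : Prop := out = totalWaviness_alt num1 num2
instance (num1 : Int) (num2 : Int) (out : Int) : Decidable (Spec_totalWaviness num1 num2 out) := by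
  unfold Spec_totalWaviness; infer_instance

-- ===== CLAIM (what is proved, stated in full; the proofs are below) =====
def Claim_equal_totalWaviness : Prop := ∀ (num1 : Int) (num2 : Int), Dom_totalWaviness num1 num2 → Pre_totalWaviness num1 num2 → Spec_totalWaviness num1 num2 (totalWaviness num1 num2)

-- ===== LEMMAS AND PROOFS =====

-- reference per-number waviness, as a recursion on Nat
def pvPureN (m : Nat) : Int :=
  if m < 100 then 0
  else pvPureN (m / 10) +
    pvTri ((m / 100 % 10 : Nat) : Int) ((m / 10 % 10 : Nat) : Int) ((m % 10 : Nat) : Int)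

-- Nat-side t(x)
def pvTN (x : Nat) : Int :=
  if x / 10 < x % 10 then ((x % 10 : Nat) : Int)
  else if x % 10 < x / 10 then 9 - ((x % 10 : Nat) : Int) else 0

-- Nat-side c(m)
def pvCN (m : Nat) : Int := if 10 ≤ m then pvTN (m % 100) else 0

-- prefix sum of waviness: S K = sum over n < K of pvPureN n
def pvS (K : Nat) : Int := ((List.range K).map pvPureN).sum

-- ---- A side: pvWavinessA n = pvPureN n.toNat for 0 ≤ n ----

def pvDigC (m : Nat) : List Char :=
  if m < 10 then [Nat.digitChar m] else pvDigC (m / 10) ++ [Nat.digitChar (m % 10)]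

def pvDig (m : Nat) : List Int :=
  if m < 10 then [(m : Int)] else pvDig (m / 10) ++ [((m % 10 : Nat) : Int)]

def pvWavLoop (ds : List Int) : Int :=
  (PySem.List.pyRange 1 ((ds.length : Int) - 1)).foldl
    (fun answer i =>
      let answer :=
        if PySem.List.pyGetD ds (i-1) 0 < PySem.List.pyGetD ds i 0 ∧
           PySem.List.pyGetD ds i 0 > PySem.List.pyGetD ds (i+1) 0
        then answer + 1 else answer
      if PySem.List.pyGetD ds (i-1) 0 > PySem.List.pyGetD ds i 0 ∧
         PySem.List.pyGetD ds i 0 < PySem.List.pyGetD ds (i+1) 0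
      then answer + 1 else answer) 0

lemma pvToDigitsCore_eq (f : Nat) : ∀ (m : Nat) (acc : List Char), m < f →
    Nat.toDigitsCore 10 f m acc = pvDigC m ++ acc := by
  induction f with
  | zero => intro m acc h; omega
  | succ f ih =>
    intro m acc h
    rw [Nat.toDigitsCore]
    by_cases h10 : m / 10 = 0
    · have hm : m < 10 := by omega
      simp only [h10, if_pos]
      rw [pvDigC, if_pos hm, Nat.mod_eq_of_lt hm]
      rfl
    · have hm : ¬ m < 10 := by omega
      simp only [if_neg h10]
      rw [ih (m/10) _ (by omega)]
      conv_rhs => rw [pvDigC, if_neg hm]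
      simp

lemma pvToChars_eq (n : Int) (h : 0 ≤ n) : PySem.Int.toChars n = pvDigC n.toNat := by
  rw [PySem.Int.toChars, if_neg (by omega), Nat.toDigits,
    pvToDigitsCore_eq _ _ _ (Nat.lt_succ_self _), List.append_nil]

lemma pvDigitVal_digitChar (d : Nat) (h : d < 10) : pvDigitVal (Nat.digitChar d) = (d : Int) := by
  interval_cases d <;> decide

lemma pvMap_pvDigC (m : Nat) : (pvDigC m).map pvDigitVal = pvDig m := by
  induction m using pvDig.induct with
  | case1 m hm => rw [pvDigC, if_pos hm, pvDig, if_pos hm]; simp [pvDigitVal_digitChar m hm]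
  | case2 m hm ih =>
    rw [pvDigC, if_neg hm, pvDig, if_neg hm]
    simp [ih, pvDigitVal_digitChar (m % 10) (Nat.mod_lt _ (by norm_num))]

lemma pvDig_length_pos (m : Nat) : 1 ≤ (pvDig m).length := by
  rw [pvDig]; split <;> simp

lemma pvDig_last (m : Nat) : (pvDig m).getD ((pvDig m).length - 1) 0 = ((m % 10 : Nat) : Int) := by
  by_cases hm : m < 10
  · rw [pvDig, if_pos hm]; simp [Nat.mod_eq_of_lt hm]
  · rw [pvDig, if_neg hm]
    simp

lemma pvDig_second_last (m : Nat) (h : 10 ≤ m) :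
    (pvDig m).getD ((pvDig m).length - 2) 0 = ((m / 10 % 10 : Nat) : Int) := by
  rw [pvDig, if_neg (by omega)]
  have h1 := pvDig_length_pos (m / 10)
  rw [List.length_append, List.length_singleton,
    List.getD_append _ _ _ _ (by omega)]
  have := pvDig_last (m / 10)
  simpa using this

def pvG (ds : List Int) (i : Int) : Int :=
  (if PySem.List.pyGetD ds (i-1) 0 < PySem.List.pyGetD ds i 0 ∧
      PySem.List.pyGetD ds i 0 > PySem.List.pyGetD ds (i+1) 0 then 1 else 0) +
  (if PySem.List.pyGetD ds (i-1) 0 > PySem.List.pyGetD ds i 0 ∧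
      PySem.List.pyGetD ds i 0 < PySem.List.pyGetD ds (i+1) 0 then 1 else 0)

lemma pvTri_eq_pvG_pieces (a b c : Int) :
    pvTri a b c = (if a < b ∧ b > c then (1:Int) else 0) + (if a > b ∧ b < c then (1:Int) else 0) := by
  unfold pvTri; split_ifs <;> omega

lemma pvWavLoop_sum (ds : List Int) :
    pvWavLoop ds = ((PySem.List.pyRange 1 ((ds.length : Int) - 1)).map (pvG ds)).sum := by
  unfold pvWavLoop
  rw [PySem.List.foldl_congr_mem'
    (g := fun answer i => answer + pvG ds i)
    (h := fun i _ acc => by unfold pvG; dsimp only; split_ifs <;> ring)]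
  rw [PySem.List.foldl_add, zero_add]

lemma pvGetD_append_lt (ds : List Int) (c : Int) (j : Int) (h0 : 0 ≤ j) (h1 : j < ds.length) :
    PySem.List.pyGetD (ds ++ [c]) j 0 = PySem.List.pyGetD ds j 0 := by
  rw [PySem.List.pyGetD_of_nonneg _ _ h0, PySem.List.pyGetD_of_nonneg _ _ h0,
    List.getD_append _ _ _ _ (by omega)]

lemma pvWavLoop_snoc (ds : List Int) (c : Int) (h : 2 ≤ ds.length) :
    pvWavLoop (ds ++ [c]) = pvWavLoop ds +
      ((if ds.getD (ds.length - 2) 0 < ds.getD (ds.length - 1) 0 ∧ ds.getD (ds.length - 1) 0 > c then 1 else 0) +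
       (if ds.getD (ds.length - 2) 0 > ds.getD (ds.length - 1) 0 ∧ ds.getD (ds.length - 1) 0 < c then 1 else 0)) := by
  rw [pvWavLoop_sum, pvWavLoop_sum]
  have hm : ((ds ++ [c]).length : Int) - 1 = (ds.length : Int) := by simp
  rw [hm]
  have hsplit : PySem.List.pyRange 1 (ds.length : Int)
      = PySem.List.pyRange 1 ((ds.length : Int) - 1) ++ [(ds.length : Int) - 1] := by
    have := PySem.List.pyRange_one_succ_right (a := 1) (b := (ds.length : Int) - 1) (by omega)
    simpa using this
  rw [hsplit, List.map_append, List.sum_append]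
  congr 1
  · congr 1
    apply List.map_congr_left
    intro i hi
    have hmem := PySem.List.mem_pyRange_one.mp hi
    unfold pvG
    rw [pvGetD_append_lt ds c (i-1) (by omega) (by omega),
        pvGetD_append_lt ds c i (by omega) (by omega),
        pvGetD_append_lt ds c (i+1) (by omega) (by omega)]
  · simp only [List.map_singleton, List.sum_singleton]
    unfold pvG
    rw [show ((ds.length : Int) - 1) - 1 = ((ds.length : Int) - 2) by ring,
        show ((ds.length : Int) - 1) + 1 = (ds.length : Int) by ring]
    rw [pvGetD_append_lt ds c ((ds.length : Int) - 2) (by omega) (by omega),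
        pvGetD_append_lt ds c ((ds.length : Int) - 1) (by omega) (by omega)]
    rw [PySem.List.pyGetD_of_nonneg (ds ++ [c]) (d := 0) (i := (ds.length : Int)) (by omega),
        PySem.List.pyGetD_of_nonneg ds (d := 0) (i := (ds.length : Int) - 2) (by omega),
        PySem.List.pyGetD_of_nonneg ds (d := 0) (i := (ds.length : Int) - 1) (by omega)]
    rw [show ((ds.length : Int)).toNat = ds.length by omega,
        show ((ds.length : Int) - 1).toNat = ds.length - 1 by omega,
        show ((ds.length : Int) - 2).toNat = ds.length - 2 by omega]
    rw [List.getD_append_right _ _ _ _ (by omega)]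
    simp

lemma pvDig_length_ge2 (k : Nat) (h : 10 ≤ k) : 2 ≤ (pvDig k).length := by
  rw [pvDig, if_neg (by omega)]
  have := pvDig_length_pos (k / 10)
  simp only [List.length_append, List.length_singleton]
  omega

lemma pvWavLoop_pvDig (m : Nat) : pvWavLoop (pvDig m) = pvPureN m := by
  induction m using pvPureN.induct with
  | case1 m hm =>
    rw [pvPureN, if_pos hm, pvWavLoop_sum]
    have hlen : (pvDig m).length ≤ 2 := by
      by_cases h10 : m < 10
      · rw [pvDig, if_pos h10]; simp
      · rw [pvDig, if_neg h10, List.length_append, List.length_singleton]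
        rw [pvDig, if_pos (by omega)]; simp
    rw [PySem.List.pyRange_one_eq_nil (by omega)]
    rfl
  | case2 m hm ih =>
    have h10 : 10 ≤ m / 10 := by omega
    conv_lhs => rw [pvDig, if_neg (by omega : ¬ m < 10)]
    rw [pvWavLoop_snoc _ _ (pvDig_length_ge2 _ h10)]
    rw [pvDig_last (m / 10), pvDig_second_last (m / 10) h10, ih]
    rw [Nat.div_div_eq_div_mul]
    conv_rhs => rw [pvPureN, if_neg hm]
    rw [pvTri_eq_pvG_pieces]

lemma pvWavinessA_eq_pvPureN (m : Nat) : pvWavinessA (m : Int) = pvPureN m := by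
  have h1 : pvWavinessA (m : Int) = pvWavLoop ((PySem.Int.toChars (m : Int)).map pvDigitVal) := rfl
  rw [h1, pvToChars_eq _ (by positivity), Int.toNat_natCast, pvMap_pvDigC, pvWavLoop_pvDig]

-- ---- B side: pvWav, pvC, pvP, pvT against the reference ----

lemma pvWav_acc (m : Nat) : ∀ w : Int, pvWav (m : Int) w = w + pvPureN m := by
  induction m using Nat.strong_induction_on with
  | _ m ih =>
    intro w
    rw [pvWav, pvPureN]
    by_cases hm : m < 100
    · rw [dif_neg (by exact_mod_cast by omega), if_pos hm, add_zero]
    · rw [dif_pos (by exact_mod_cast by omega : (100:Int) ≤ (m:Int)), if_neg hm]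
      rw [PySem.Int.floordiv_eq_ediv_of_pos (a := (m:Int)) (by norm_num),
          PySem.Int.floordiv_eq_ediv_of_pos (a := (m:Int)) (by norm_num),
          PySem.Int.mod_eq_emod_of_pos (a := (m:Int)) (by norm_num)]
      rw [show ((m:Int) / 10) = ((m / 10 : Nat) : Int) by push_cast; ring,
          show ((m:Int) / 100) = ((m / 100 : Nat) : Int) by push_cast; ring,
          show ((m:Int) % 10) = ((m % 10 : Nat) : Int) by push_cast; ring]
      rw [PySem.Int.mod_eq_emod_of_pos (by norm_num), PySem.Int.mod_eq_emod_of_pos (by norm_num)]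
      rw [show (((m / 10 : Nat) : Int)) % 10 = ((m / 10 % 10 : Nat) : Int) by push_cast; ring,
          show (((m / 100 : Nat) : Int)) % 10 = ((m / 100 % 10 : Nat) : Int) by push_cast; ring]
      rw [ih (m / 10) (by omega)]
      ring

lemma pvPureN_lt_100 (m : Nat) (h : m < 100) : pvPureN m = 0 := by
  rw [pvPureN, if_pos h]

lemma pvPureN_step (m d : Nat) (hd : d < 10) :
    pvPureN (10 * m + d) = pvPureN m +
      (if 10 ≤ m then pvTri ((m / 10 % 10 : Nat) : Int) ((m % 10 : Nat) : Int) ((d : Nat) : Int) else 0) := by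
  by_cases hm : 10 ≤ m
  · rw [pvPureN, if_neg (by omega), if_pos hm]
    have e1 : (10 * m + d) / 10 = m := by omega
    have e2 : (10 * m + d) % 10 = d := by omega
    have e3 : (10 * m + d) / 100 % 10 = m / 10 % 10 := by omega
    have e4 : (10 * m + d) / 10 % 10 = m % 10 := by omega
    simp only [e1, e2, e3]
  · rw [if_neg hm, pvPureN_lt_100 _ (by omega), pvPureN_lt_100 _ (by omega), add_zero]

-- triple-count closed forms (finite checks over digits)
set_option maxHeartbeats 1000000 in
lemma pvTri_sum_full (a : Nat) (ha : a < 10) (b : Nat) (hb : b < 10) :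
    ((List.range 10).map (fun d : Nat => pvTri (a : Int) (b : Int) (d : Int))).sum =
      (if (a:Int) < b then (b:Int) else if (b:Int) < a then 9 - (b:Int) else 0) := by
  revert a ha b hb
  decide

set_option maxHeartbeats 4000000 in
lemma pvTri_sum_partial (a : Nat) (ha : a < 10) (b : Nat) (hb : b < 10) (r : Nat) (hr : r < 10) :
    ((List.range (r + 1)).map (fun d : Nat => pvTri (a : Int) (b : Int) (d : Int))).sum =
      (if (a:Int) < b then min ((r:Int) + 1) (b:Int)
       else if (b:Int) < a then (if (r:Int) > (b:Int) then (r:Int) - b else 0) else 0) := by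
  revert a ha b hb r hr
  decide

-- pvT10 on a Nat cast is pvTN
lemma pvT10_natCast (x : Nat) : pvT10 ((x : Nat) : Int) = pvTN x := by
  simp only [pvT10]
  rw [PySem.Int.floordiv_eq_ediv_of_pos (by norm_num), PySem.Int.mod_eq_emod_of_pos (by norm_num)]
  unfold pvTN
  split_ifs <;> omega

-- pvPre on a Nat cast is the prefix sum of pvTN
lemma pvPre_natCast (i : Nat) : pvPre ((i : Nat) : Int) = ((List.range i).map pvTN).sum := by
  unfold pvPre
  rw [PySem.List.foldl_add, zero_add, PySem.List.pyRange_zero_natCast, List.map_map]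
  congr 1
  exact List.map_congr_left fun m _ => pvT10_natCast m

set_option maxRecDepth 4000 in
lemma pvPreF_100 : ((List.range 100).map pvTN).sum = 570 := by decide

-- periodic sum: sum over m < K of pvTN (m % 100)
lemma pvTN_periodic_sum (K : Nat) :
    ((List.range K).map (fun m => pvTN (m % 100))).sum =
      ((K / 100 : Nat) : Int) * 570 + ((List.range (K % 100)).map pvTN).sum := by
  induction K with
  | zero => simp
  | succ K ih =>
    rw [List.range_succ, List.map_append, List.sum_append, ih]
    by_cases h : K % 100 = 99
    · have e1 : (K + 1) / 100 = K / 100 + 1 := by omega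
      have e2 : (K + 1) % 100 = 0 := by omega
      have h570 : ((List.range 99).map pvTN).sum + pvTN 99 = 570 := by
        have := pvPreF_100
        rw [show (100:Nat) = 99 + 1 from rfl, List.range_succ, List.map_append, List.sum_append] at this
        simpa using this
      rw [e1, e2]
      simp only [h, List.range_zero, List.map_nil, List.sum_nil, add_zero,
        List.map_cons, List.sum_cons]
      rw [add_assoc, h570]
      push_cast
      ring
    · have e1 : (K + 1) / 100 = K / 100 := by omega
      have e2 : (K + 1) % 100 = K % 100 + 1 := by omega
      rw [e1, e2, List.range_succ, List.map_append, List.sum_append]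
      simp [add_assoc]

-- splitting the first ten terms off a prefix sum
lemma pvCN_sum_eq (K : Nat) (hK : 10 ≤ K) :
    ((List.range K).map pvCN).sum = ((List.range K).map (fun m => pvTN (m % 100))).sum - 45 := by
  obtain ⟨J, rfl⟩ : ∃ J, K = 10 + J := ⟨K - 10, by omega⟩
  rw [List.range_add, List.map_append, List.sum_append, List.map_append, List.sum_append]
  have h1 : ((List.range 10).map pvCN).sum = 0 := by decide
  have h2 : ((List.range 10).map (fun m => pvTN (m % 100))).sum = 45 := by decide
  have h3 : ∀ j : Nat, pvCN (10 + j) = pvTN ((10 + j) % 100) := by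
    intro j; unfold pvCN; rw [if_pos (by omega)]
  rw [h1, h2, List.map_map, List.map_map]
  have h4 : ((List.range J).map (pvCN ∘ fun j => 10 + j)).sum
      = ((List.range J).map ((fun m => pvTN (m % 100)) ∘ fun j => 10 + j)).sum := by
    exact congrArg List.sum (List.map_congr_left fun j _ => h3 j)
  rw [h4]
  ring

lemma pvC_natCast (M : Nat) :
    pvC ((M : Nat) : Int) = ((List.range (M + 1)).map pvCN).sum := by
  unfold pvC
  by_cases hM : M < 10
  · rw [if_pos (by exact_mod_cast hM)]
    symm
    apply List.sum_eq_zero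
    intro x hx
    simp only [List.mem_map, List.mem_range] at hx
    obtain ⟨m, hm, rfl⟩ := hx
    unfold pvCN
    rw [if_neg (by omega)]
  · rw [if_neg (by exact_mod_cast hM)]
    have ef : PySem.Int.floordiv (((M:Nat):Int) + 1) 100 = (((M + 1) / 100 : Nat) : Int) := by
      rw [PySem.Int.floordiv_eq_ediv_of_pos (by norm_num)]; omega
    have em : PySem.Int.mod (((M:Nat):Int) + 1) 100 = (((M + 1) % 100 : Nat) : Int) := by
      rw [PySem.Int.mod_eq_emod_of_pos (by norm_num)]; omega
    rw [ef, em, pvPre_natCast, pvCN_sum_eq (M+1) (by omega), pvTN_periodic_sum (M+1)]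

lemma pvConstSum (c : Int) (n : Nat) : ((List.range n).map (fun _ => c)).sum = (n : Int) * c := by
  induction n with
  | zero => simp
  | succ n ih =>
    rw [List.range_succ, List.map_append, List.sum_append, ih]
    simp
    ring_nf

-- the full-block triple count is pvCN
lemma pvCN_eq_triSum (q : Nat) (hq : 10 ≤ q) :
    ((List.range 10).map (fun d : Nat => pvTri ((q / 10 % 10 : Nat) : Int) ((q % 10 : Nat) : Int) (d : Int))).sum
      = pvCN q := by
  rw [pvTri_sum_full (q / 10 % 10) (by omega) (q % 10) (by omega)]
  unfold pvCN pvTN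
  rw [if_pos hq]
  have e1 : q % 100 / 10 = q / 10 % 10 := by omega
  have e2 : q % 100 % 10 = q % 10 := by omega
  rw [e1, e2]
  split_ifs <;> first | rfl | omega

lemma pvS_block (q : Nat) :
    pvS (10 * q) = 10 * pvS q + ((List.range q).map pvCN).sum := by
  induction q with
  | zero => simp [pvS]
  | succ q ih =>
    have e : 10 * (q + 1) = 10 * q + 10 := by ring
    unfold pvS
    rw [e, List.range_add, List.map_append, List.sum_append, List.map_map]
    have hblock : ((List.range 10).map (pvPureN ∘ fun j => 10 * q + j)).sum
        = 10 * pvPureN q + pvCN q := by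
      have hcongr : ((List.range 10).map (pvPureN ∘ fun j => 10 * q + j)).sum
          = ((List.range 10).map (fun d => pvPureN q +
              (if 10 ≤ q then pvTri ((q / 10 % 10 : Nat) : Int) ((q % 10 : Nat) : Int) ((d : Nat) : Int) else 0))).sum := by
        refine congrArg List.sum (List.map_congr_left fun d hd => ?_)
        simp only [List.mem_range] at hd
        exact pvPureN_step q d hd
      rw [hcongr]
      by_cases hq : 10 ≤ q
      · simp only [if_pos hq]
        rw [List.sum_map_add, pvConstSum, ← pvCN_eq_triSum q hq]
        push_cast
        ring
      · simp only [if_neg hq]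
        rw [pvConstSum]
        unfold pvCN
        rw [if_neg hq]
        push_cast
        ring
    rw [hblock]
    unfold pvS at ih
    rw [ih, List.range_succ, List.map_append, List.sum_append]
    simp
    ring

lemma pvS_zero_lt_100 (K : Nat) (h : K ≤ 100) : pvS K = 0 := by
  apply List.sum_eq_zero
  intro x hx
  simp only [List.mem_map, List.mem_range] at hx
  obtain ⟨m, hm, rfl⟩ := hx
  exact pvPureN_lt_100 m (by omega)

lemma pvT_eq_pvS (N : Nat) : pvT ((N : Nat) : Int) = pvS (N + 1) := by
  induction N using Nat.strong_induction_on with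
  | _ N ih =>
    by_cases hN : N < 100
    · rw [pvT, dif_pos (by exact_mod_cast hN)]
      rw [pvS_zero_lt_100 (N + 1) (by omega)]
    · rw [pvT, dif_neg (by exact_mod_cast hN)]
      simp only
      set q : Nat := N / 10 with hq
      set r : Nat := N % 10 with hr
      have hq10 : 10 ≤ q := by omega
      have eq1 : PySem.Int.floordiv ((N:Nat):Int) 10 = ((q : Nat) : Int) := by
        rw [PySem.Int.floordiv_eq_ediv_of_pos (by norm_num)]; omega
      have eq2 : PySem.Int.mod ((N:Nat):Int) 10 = ((r : Nat) : Int) := by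
        rw [PySem.Int.mod_eq_emod_of_pos (by norm_num)]; omega
      have eq3 : ((q : Nat) : Int) - 1 = (((q - 1 : Nat)) : Int) := by omega
      rw [eq1, eq2, eq3]
      rw [ih (q - 1) (by omega), pvC_natCast (q - 1), show q - 1 + 1 = q by omega,
          pvWav_acc q 0, zero_add]
      -- pvP on casts
      have hP : pvP ((q : Nat) : Int) ((r : Nat) : Int)
          = ((List.range (r + 1)).map (fun d : Nat => pvTri ((q / 10 % 10 : Nat) : Int) ((q % 10 : Nat) : Int) (d : Int))).sum := by
        unfold pvP
        simp only
        have ea : PySem.Int.mod (PySem.Int.floordiv ((q:Nat):Int) 10) 10 = ((q / 10 % 10 : Nat) : Int) := by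
          rw [PySem.Int.floordiv_eq_ediv_of_pos (by norm_num),
              PySem.Int.mod_eq_emod_of_pos (by norm_num)]
          omega
        have eb : PySem.Int.mod ((q:Nat):Int) 10 = ((q % 10 : Nat) : Int) := by
          rw [PySem.Int.mod_eq_emod_of_pos (by norm_num)]; omega
        rw [ea, eb, pvTri_sum_partial (q / 10 % 10) (by omega) (q % 10) (by omega) r (by omega)]
      rw [hP]
      -- spec side: split N + 1 = 10 * q + (r + 1)
      have eN : N + 1 = 10 * q + (r + 1) := by omega
      have hsplitS : pvS (10 * q + (r + 1)) = pvS (10 * q)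
          + ((List.range (r + 1)).map (pvPureN ∘ fun j => 10 * q + j)).sum := by
        unfold pvS
        rw [List.range_add, List.map_append, List.sum_append, List.map_map]
      have hpart : ((List.range (r + 1)).map (pvPureN ∘ fun j => 10 * q + j)).sum
          = ((r : Int) + 1) * pvPureN q
            + ((List.range (r + 1)).map (fun d : Nat => pvTri ((q / 10 % 10 : Nat) : Int) ((q % 10 : Nat) : Int) (d : Int))).sum := by
        have hcongr : ((List.range (r + 1)).map (pvPureN ∘ fun j => 10 * q + j)).sum
            = ((List.range (r + 1)).map (fun d => pvPureN q +
                pvTri ((q / 10 % 10 : Nat) : Int) ((q % 10 : Nat) : Int) ((d : Nat) : Int))).sum := by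
          refine congrArg List.sum (List.map_congr_left fun d hd => ?_)
          simp only [List.mem_range] at hd
          rw [Function.comp_apply, pvPureN_step q d (by omega), if_pos hq10]
        rw [hcongr, List.sum_map_add, pvConstSum]
        push_cast
        ring
      rw [show pvS (N + 1) = pvS (10 * q + (r + 1)) by rw [eN], hsplitS, hpart, pvS_block q]
      ring

-- sum of A's per-number values over range(0, K)
lemma pvSumA (K : Nat) :
    ((PySem.List.pyRange 0 ((K : Nat) : Int)).map pvWavinessA).sum = pvS K := by
  rw [PySem.List.pyRange_zero_natCast, List.map_map]
  exact congrArg List.sum (List.map_congr_left fun m _ => pvWavinessA_eq_pvPureN m)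

-- ===== VERDICT (by name: the statement is the Claim_ definition above) =====
theorem totalWaviness_spec : Claim_equal_totalWaviness := by
  intro num1 num2 _ hpre
  unfold Spec_totalWaviness totalWaviness totalWaviness_alt
  rw [PySem.List.foldl_add, zero_add]
  by_cases hlt : num2 < num1
  · rw [if_pos hlt, PySem.List.pyRange_one_eq_nil (by omega)]; rfl
  · have h1 : 0 ≤ num1 := by
      rcases hpre with h | h
      · omega
      · exact h
    rw [if_neg hlt]
    have h2 : 0 ≤ num2 := by omega
    have hsplit := PySem.List.pyRange_one_append 0 num1 (num2 + 1) h1 (by omega)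
    have hA : ((PySem.List.pyRange 0 (num2 + 1)).map pvWavinessA).sum = pvS (num2.toNat + 1) := by
      conv_lhs => rw [show num2 + 1 = (((num2.toNat + 1 : Nat)) : Int) by omega]
      exact pvSumA (num2.toNat + 1)
    have hB : ((PySem.List.pyRange 0 num1).map pvWavinessA).sum = pvS num1.toNat := by
      conv_lhs => rw [show num1 = ((num1.toNat : Nat) : Int) by omega]
      exact pvSumA num1.toNat
    have hsum : pvS (num2.toNat + 1)
        = pvS num1.toNat + ((PySem.List.pyRange num1 (num2 + 1)).map pvWavinessA).sum := by
      rw [← hA, ← hB, hsplit, List.map_append, List.sum_append]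
    have hT2 : pvT num2 = pvS (num2.toNat + 1) := by
      have h := pvT_eq_pvS num2.toNat
      rwa [Int.toNat_of_nonneg h2] at h
    have hT1 : pvT (num1 - 1) = pvS num1.toNat := by
      by_cases h0 : num1 = 0
      · rw [h0]
        rw [pvT, dif_pos (by norm_num)]
        simp [pvS]
      · have h := pvT_eq_pvS (num1.toNat - 1)
        rw [show (((num1.toNat - 1 : Nat)) : Int) = num1 - 1 by omega,
            show num1.toNat - 1 + 1 = num1.toNat by omega] at h
        exact h
    rw [hT2, hT1]
    omega
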